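-- pv_equiv track=rewrite | github.com/e4903180/financialSite | DB/gmail/extractPdfRate.py | _check_rate
-- ===== SOURCE A (Python) =====
-- def _check_rate(rate_1:str, rate_2:str, possible_rate:list) -> str:
--     '''Check that the extracted ratings are correct
--
--         Args :
--             rate_1 : (str) extracted by method 1
--             rate_2 : (str) extracted by method 2
--             possible_rate : (list) all possible ratings
--         Return :
--             rate : (str) recommend
--     '''
--     if rate_1 == rate_2:
--         return rate_1 if rate_1 != 'NULL' else 'NULL'
--     for rate in possible_rate:
--         if rate == rate_1:
--             return rate
--         elif rate == rate_2:
--             return rate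
--     return 'NULL'
-- ===== SOURCE B (Python) =====
-- def _check_rate(rate_1: str, rate_2: str, possible_rate: list) -> str:
--     if rate_1 == rate_2:
--         return rate_1
--     n = len(possible_rate)
--     i1 = possible_rate.index(rate_1) if rate_1 in possible_rate else n
--     i2 = possible_rate.index(rate_2) if rate_2 in possible_rate else n
--     if i1 < i2:
--         return rate_1
--     if i2 < i1:
--         return rate_2
--     return 'NULL'
-- ===== Notes on version B (the rewrite author's own statement) =====
-- stated objective: alternative
-- what changed: Replaces A's single first-match scan with two independent index lookups (position of each candidate in possible_rate, defaulting to len) and an index comparison deciding the winner.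
import Mathlib
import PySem

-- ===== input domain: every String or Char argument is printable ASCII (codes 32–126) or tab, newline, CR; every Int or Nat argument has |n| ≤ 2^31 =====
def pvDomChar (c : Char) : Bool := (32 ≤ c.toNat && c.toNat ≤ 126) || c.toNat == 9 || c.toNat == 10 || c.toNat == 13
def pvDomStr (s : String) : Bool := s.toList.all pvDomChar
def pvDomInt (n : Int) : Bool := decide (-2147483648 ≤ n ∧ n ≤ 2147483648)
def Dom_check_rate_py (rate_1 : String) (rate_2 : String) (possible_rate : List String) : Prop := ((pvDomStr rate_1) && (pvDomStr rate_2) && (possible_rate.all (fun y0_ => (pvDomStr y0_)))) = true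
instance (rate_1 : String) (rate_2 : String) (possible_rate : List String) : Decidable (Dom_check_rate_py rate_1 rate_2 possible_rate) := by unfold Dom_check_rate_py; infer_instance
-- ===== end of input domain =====

-- ===== PORT A =====
-- Header: B decides via two index? lookups and an index comparison instead of A's single first-match scan (alternative decomposition, same cost).
def checkRateLoop (rate_1 : String) (rate_2 : String) : List String → String
  | [] => "NULL"
  | rate :: rest =>
    if rate == rate_1 then rate
    else if rate == rate_2 then rate
    else checkRateLoop rate_1 rate_2 rest

def check_rate_py (rate_1 : String) (rate_2 : String) (possible_rate : List String) : String :=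
  if rate_1 == rate_2 then (if rate_1 != "NULL" then rate_1 else "NULL")
  else checkRateLoop rate_1 rate_2 possible_rate

-- ===== PORT B =====
def check_rate_py_alt (rate_1 : String) (rate_2 : String) (possible_rate : List String) : String :=
  if rate_1 == rate_2 then rate_1
  else
    let n := possible_rate.length
    let i1 := match PySem.List.index? possible_rate rate_1 with | some i => i | none => n
    let i2 := match PySem.List.index? possible_rate rate_2 with | some i => i | none => n
    if i1 < i2 then rate_1
    else if i2 < i1 then rate_2
    else "NULL"

-- ===== PRECONDITION & SPEC =====
def Spec_check_rate_py (rate_1 : String) (rate_2 : String) (possible_rate : List String) (out : String) : Prop := out = check_rate_py_alt rate_1 rate_2 possible_rate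
instance (rate_1 : String) (rate_2 : String) (possible_rate : List String) (out : String) : Decidable (Spec_check_rate_py rate_1 rate_2 possible_rate out) := by unfold Spec_check_rate_py; infer_instance

-- ===== CLAIM (what is proved, stated in full; the proofs are below) =====
def Claim_equal_check_rate_py : Prop := ∀ (rate_1 : String) (rate_2 : String) (possible_rate : List String), Dom_check_rate_py rate_1 rate_2 possible_rate → Spec_check_rate_py rate_1 rate_2 possible_rate (check_rate_py rate_1 rate_2 possible_rate)

-- ===== LEMMAS AND PROOFS =====

-- ===== VERDICT (by name: the statement is the Claim_ definition above) =====
theorem loop_eq_index (rate_1 rate_2 : String) (h : rate_1 ≠ rate_2) :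
    ∀ (pr : List String),
      checkRateLoop rate_1 rate_2 pr =
        (let n := pr.length
         let i1 := match PySem.List.index? pr rate_1 with | some i => i | none => n
         let i2 := match PySem.List.index? pr rate_2 with | some i => i | none => n
         if i1 < i2 then rate_1 else if i2 < i1 then rate_2 else "NULL")
  | [] => by simp [checkRateLoop, PySem.List.index?]
  | rate :: rest => by
    by_cases h1 : rate = rate_1
    · subst h1
      have hne : rate ≠ rate_2 := h
      rw [PySem.List.index?_cons_self, PySem.List.index?_cons_of_ne (h := hne)]
      cases hi : PySem.List.index? rest rate_2 <;>
        simp [checkRateLoop]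
    · by_cases h2 : rate = rate_2
      · subst h2
        rw [PySem.List.index?_cons_self, PySem.List.index?_cons_of_ne (h := h1)]
        cases hi : PySem.List.index? rest rate_1 <;>
          simp [checkRateLoop, h1]
      · have ih := loop_eq_index rate_1 rate_2 h rest
        rw [PySem.List.index?_cons_of_ne (h := h1), PySem.List.index?_cons_of_ne (h := h2)]
        simp only [checkRateLoop, beq_iff_eq, h1, h2, if_false, ih]
        cases hi1 : PySem.List.index? rest rate_1 <;>
          cases hi2 : PySem.List.index? rest rate_2 <;>
            simp only [Option.map_some, Option.map_none, List.length_cons,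
                       Nat.add_lt_add_iff_right]

theorem check_rate_py_spec : Claim_equal_check_rate_py := by
  intro r1 r2 pr _
  unfold Spec_check_rate_py check_rate_py check_rate_py_alt
  by_cases h : r1 = r2
  · subst h; by_cases hn : r1 = "NULL" <;> simp [hn]
  · simp only [beq_iff_eq, h, if_false]
    exact loop_eq_index r1 r2 h pr
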